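-- pv_equiv track=rewrite | github.com/HieuGITLAB/CODEPTIT | lietkesodep.py | check
-- ===== SOURCE A (Python) =====
-- def check(n):
--     num_list =[]
--     for i in range(len(n)):
--         num_list.append(n[i])
--     k = set(num_list)
--     if len(k) % 2 == 0:
--         return False
--     return True
-- ===== SOURCE B (Python) =====
-- def check(n):
--     s = sorted(n)
--     if not s:
--         return False
--     distinct = 1 + sum(1 for a, b in zip(s, s[1:]) if a != b)
--     return distinct % 2 == 1
-- ===== Notes on version B (the rewrite author's own statement) =====
-- stated objective: alternative
-- what changed: Replaces building a character list and hashing it into a set with a sort-then-single-scan: sort the characters and count distinct ones as 1 + the number of adjacent unequal pairs, then test the parity directly.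
import Mathlib
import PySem

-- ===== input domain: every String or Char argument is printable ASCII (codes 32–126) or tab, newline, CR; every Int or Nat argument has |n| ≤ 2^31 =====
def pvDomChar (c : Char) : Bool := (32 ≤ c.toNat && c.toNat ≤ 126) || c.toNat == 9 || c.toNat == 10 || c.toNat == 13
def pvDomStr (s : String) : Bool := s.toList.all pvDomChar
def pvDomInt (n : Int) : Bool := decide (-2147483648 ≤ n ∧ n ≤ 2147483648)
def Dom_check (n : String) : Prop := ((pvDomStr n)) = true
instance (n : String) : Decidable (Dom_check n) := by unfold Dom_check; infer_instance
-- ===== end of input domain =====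

-- B sorts the characters and counts distinct ones as 1 + the number of adjacent unequal pairs, instead of A's list-building + set; alternative decomposition, same results on every input.

-- ===== PORT A =====
def check (n : String) : Bool :=
  let numList := (PySem.List.pyRange 0 (PySem.Str.len n) 1).foldl
      (fun acc i => acc ++ [PySem.List.pyGetD n.toList i ' ']) []
  let k : PySem.Set Char := PySem.Set.ofList numList
  if PySem.Set.len k % 2 == 0 then false else true

-- ===== PORT B =====
def check_alt (n : String) : Bool :=
  let s := PySem.List.sorted n.toList (fun x => x) false
  if s = [] then false
  else
    let distinct := 1 + ((s.zip (PySem.List.slice s (some 1) none)).countP (fun p => p.1 ≠ p.2))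
    distinct % 2 == 1

-- ===== PRECONDITION & SPEC =====
def Spec_check (n : String) (out : Bool) : Prop := out = check_alt n
instance (n : String) (out : Bool) : Decidable (Spec_check n out) := by unfold Spec_check; infer_instance

-- ===== CLAIM (what is proved, stated in full; the proofs are below) =====
def Claim_equal_check : Prop := ∀ (n : String), Dom_check n → Spec_check n (check n)

-- ===== LEMMAS AND PROOFS =====

def runs : List Char → Nat
  | [] => 0
  | [_] => 1
  | a :: b :: t => (if a = b then 0 else 1) + runs (b :: t)

theorem runs_eq_zip_count (a : Char) (t : List Char) :
    runs (a :: t) = 1 + ((a :: t).zip t).countP (fun p => p.1 ≠ p.2) := by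
  induction t generalizing a with
  | nil => simp [runs]
  | cons b t' ih =>
    simp only [runs, List.zip_cons_cons, List.countP_cons, ih b]
    by_cases h : a = b
    · simp [h]
    · simp [h]
      omega

theorem runs_sorted_card (s : List Char) (h : s.Pairwise (· ≤ ·)) :
    runs s = s.toFinset.card := by
  induction s with
  | nil => simp [runs]
  | cons a t ih =>
    cases t with
    | nil => simp [runs]
    | cons b t' =>
      have hab : a ≤ b := (List.pairwise_cons.mp h).1 b (by simp)
      have htail : (b :: t').Pairwise (· ≤ ·) := (List.pairwise_cons.mp h).2
      by_cases he : a = b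
      · subst he
        simp [runs, ih htail]
      · have hlt : a < b := lt_of_le_of_ne hab he
        have hnotmem : a ∉ (b :: t').toFinset := by
          simp only [List.toFinset_cons, Finset.mem_insert, List.mem_toFinset]
          rintro (rfl | hx)
          · exact he rfl
          · exact absurd rfl (ne_of_lt (lt_of_lt_of_le hlt ((List.pairwise_cons.mp htail).1 a hx)))
        have h2 : (a :: b :: t').toFinset = insert a (b :: t').toFinset := List.toFinset_cons
        rw [h2, Finset.card_insert_of_notMem hnotmem]
        simp only [runs, if_neg he, ih htail]
        omega

theorem set_len_card (l : List Char) : (PySem.Set.ofList l).length = l.toFinset.card := by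
  rw [← List.toFinset_card_of_nodup (PySem.Set.nodup_ofList l)]
  congr 1
  ext x
  simp [PySem.Set.mem_ofList l x]

theorem foldl_concat_chars (l init : List Char) :
    l.foldl (fun acc c => acc ++ [c]) init = init ++ l := by
  induction l generalizing init with
  | nil => simp
  | cons c t ih => simp [ih]

theorem fold_chars (n : String) :
    (PySem.List.pyRange 0 (PySem.Str.len n) 1).foldl
      (fun acc i => acc ++ [PySem.List.pyGetD n.toList i ' ']) [] = n.toList := by
  have hlen : PySem.Str.len n = PySem.List.len n.toList := by
    simp [PySem.Str.len_eq, PySem.List.len_eq]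
  rw [hlen]
  have := PySem.List.foldl_pyRange_pyGetD (xs := n.toList) (a := 0)
      (f := fun (acc : List Char) (c : Char) => acc ++ [c]) (d := ' ') (init := [])
      (by norm_num)
  rw [this, foldl_concat_chars]
  simp

theorem main_eq (n : String) : check n = check_alt n := by
  unfold check check_alt
  simp only [fold_chars, PySem.List.slice_from_one]
  have hperm : (PySem.List.sorted n.toList (fun x => x) false).Perm n.toList :=
    PySem.List.sorted_perm n.toList _ _
  have hpair : (PySem.List.sorted n.toList (fun x => x) false).Pairwise (· ≤ ·) :=
    PySem.List.sorted_pairwise n.toList _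
  have hlen : PySem.Set.len (PySem.Set.ofList n.toList)
      = ((n.toList.toFinset.card : Int)) := by
    simp [PySem.Set.len, set_len_card]
  cases hcase : PySem.List.sorted n.toList (fun x => x) false with
  | nil =>
    have hnil : n.toList = [] := by
      have h := hperm
      rw [hcase] at h
      exact (h.symm).eq_nil
    rw [hcase] at *
    simp [hnil, PySem.Set.len, PySem.Set.ofList]
  | cons a t =>
    have hcount : (1 + ((a :: t).zip t).countP (fun p => p.1 ≠ p.2))
        = n.toList.toFinset.card := by
      have h1 := runs_eq_zip_count a t
      have h2 := runs_sorted_card (a :: t) (hcase ▸ hpair)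
      have hfin : (a :: t).toFinset = n.toList.toFinset := by
        ext x
        have := (hcase ▸ hperm).mem_iff (a := x)
        rw [List.mem_toFinset, List.mem_toFinset, ← this, List.mem_cons]
      rw [← h1, h2, hfin]
    simp only [reduceCtorEq, List.tail_cons, hcount, hlen]
    by_cases hc : n.toList.toFinset.card % 2 = 0
    · have hi : ((n.toList.toFinset.card : Int)) % 2 = 0 := by omega
      simp [hi, hc]
    · have h1 : n.toList.toFinset.card % 2 = 1 := by omega
      have hi : ¬(((n.toList.toFinset.card : Int)) % 2 = 0) := by omega
      simp [hi, h1]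

-- ===== VERDICT (by name: the statement is the Claim_ definition above) =====
theorem check_spec : Claim_equal_check := by
  intro n _
  unfold Spec_check
  exact main_eq n
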